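-- pv_equiv track=rewrite | github.com/pypi-data/pypi-mirror-399 | packages/ison-py/ison_py-1.0.1.tar.gz/ison_py-1.0.1/src/ison_parser/__init__.py | _smart_order_fields
-- ===== SOURCE A (Python) =====
-- def _smart_order_fields(fields: list[str]) -> list[str]:
--     """
--     Reorder fields for optimal LLM comprehension.
--
--     Order priority:
--     1. 'id' field first (primary anchor)
--     2. Human-readable fields: name, title, label, description
--     3. Regular data fields
--     4. Foreign key references (*_id) last
--
--     This ordering helps LLMs anchor on identity first, then
--     associate human-readable names, reducing column confusion.
--     """
--     # Categorize fields
--     id_fields = []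
--     name_fields = []
--     ref_fields = []  # *_id fields
--     other_fields = []
--
--     # Priority names that should come early
--     priority_names = {'name', 'title', 'label', 'description', 'display_name', 'full_name'}
--
--     for field in fields:
--         field_lower = field.lower()
--         if field_lower == 'id':
--             id_fields.append(field)
--         elif field_lower in priority_names:
--             name_fields.append(field)
--         elif field_lower.endswith('_id') and field_lower != 'id':
--             ref_fields.append(field)
--         else:
--             other_fields.append(field)
--
--     # Return in optimal order: id -> names -> data -> references
--     return id_fields + name_fields + other_fields + ref_fields
-- ===== SOURCE B (Python) =====
-- def _smart_order_fields(fields: list[str]) -> list[str]: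
--     """Reorder fields: 'id' first, human-readable names next, data fields, then *_id refs.
--
--     Implemented as a stable sort by an integer priority instead of four bucket lists.
--     """
--     priority_names = {'name', 'title', 'label', 'description', 'display_name', 'full_name'}
--
--     def rank(field: str) -> int:
--         fl = field.lower()
--         if fl == 'id':
--             return 0
--         if fl in priority_names:
--             return 1
--         if fl.endswith('_id'):
--             return 3
--         return 2
--
--     return sorted(fields, key=rank)
-- ===== Notes on version B (the rewrite author's own statement) =====
-- stated objective: idiomatic
-- what changed: Replaced the four explicit bucket lists with a single stable sort keyed by an integer priority function, relying on sort stability for intra-category order.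
import Mathlib
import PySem

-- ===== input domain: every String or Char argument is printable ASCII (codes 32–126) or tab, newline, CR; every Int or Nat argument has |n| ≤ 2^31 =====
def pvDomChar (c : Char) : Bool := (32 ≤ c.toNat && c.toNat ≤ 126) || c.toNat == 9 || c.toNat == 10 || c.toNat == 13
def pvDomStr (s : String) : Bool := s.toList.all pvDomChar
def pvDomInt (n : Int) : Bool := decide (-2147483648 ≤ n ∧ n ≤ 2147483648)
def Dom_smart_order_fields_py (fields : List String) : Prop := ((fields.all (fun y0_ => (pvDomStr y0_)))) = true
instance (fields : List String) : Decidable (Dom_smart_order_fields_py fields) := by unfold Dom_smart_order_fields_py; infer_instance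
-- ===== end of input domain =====

-- B replaces A's four explicit bucket lists with one stable sort by an integer priority key (idiomatic, same result).


-- ===== PORT A =====
-- the priority_names set literal of A
def pvPriorityNames : List String := ["name", "title", "label", "description", "display_name", "full_name"]

-- A's loop body: append field to the category list its branch selects
def pvStepA (acc : List String × List String × List String × List String) (field : String) :
    List String × List String × List String × List String :=
  let fl := PySem.Str.lower field
  if fl = "id" then (acc.1 ++ [field], acc.2.1, acc.2.2.1, acc.2.2.2)
  else if pvPriorityNames.contains fl then (acc.1, acc.2.1 ++ [field], acc.2.2.1, acc.2.2.2)
  else if PySem.Str.endswith fl "_id" ∧ fl ≠ "id" then (acc.1, acc.2.1, acc.2.2.1, acc.2.2.2 ++ [field])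
  else (acc.1, acc.2.1, acc.2.2.1 ++ [field], acc.2.2.2)

-- A: one pass filling four category lists, then concatenation
def smart_order_fields_py (fields : List String) : List String :=
  let r := fields.foldl pvStepA ([], [], [], [])
  r.1 ++ r.2.1 ++ r.2.2.1 ++ r.2.2.2

-- ===== PORT B =====
-- B's integer priority key
def pvRank (field : String) : Int :=
  let fl := PySem.Str.lower field
  if fl = "id" then 0
  else if pvPriorityNames.contains fl then 1
  else if PySem.Str.endswith fl "_id" then 3
  else 2

-- B: stable sort by the priority key
def smart_order_fields_py_alt (fields : List String) : List String :=
  PySem.List.sorted fields pvRank false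

-- ===== PRECONDITION & SPEC =====
def Spec_smart_order_fields_py (fields : List String) (out : List String) : Prop := out = smart_order_fields_py_alt fields
instance (fields : List String) (out : List String) : Decidable (Spec_smart_order_fields_py fields out) := by unfold Spec_smart_order_fields_py; infer_instance

-- ===== CLAIM (what is proved, stated in full; the proofs are below) =====
def Claim_equal_smart_order_fields_py : Prop := ∀ (fields : List String), Dom_smart_order_fields_py fields → Spec_smart_order_fields_py fields (smart_order_fields_py fields)

-- ===== LEMMAS AND PROOFS =====

-- the k-th priority bucket of a list
def pvBucket (k : Int) (xs : List String) : List String := xs.filter (fun f => pvRank f = k)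

lemma pvRank_cases (f : String) : pvRank f = 0 ∨ pvRank f = 1 ∨ pvRank f = 2 ∨ pvRank f = 3 := by
  simp only [pvRank]; split_ifs <;> simp

lemma pvBucket_append (k : Int) (p : List String) (x : String) :
    pvBucket k (p ++ [x]) = pvBucket k p ++ (if pvRank x = k then [x] else []) := by
  simp only [pvBucket, List.filter_append]
  split_ifs with h <;> simp [h]

lemma mem_pvBucket_rank {k : Int} {xs : List String} {y : String} (h : y ∈ pvBucket k xs) :
    pvRank y = k := by
  simp only [pvBucket, List.mem_filter, decide_eq_true_eq] at h; exact h.2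

-- invariant of A's fold: the state is the four buckets of the processed prefix
lemma a_fold_state (fields : List String) :
    fields.foldl pvStepA ([], [], [], []) =
      (pvBucket 0 fields, pvBucket 1 fields, pvBucket 2 fields, pvBucket 3 fields) := by
  induction fields using List.reverseRecOn with
  | nil => rfl
  | append_singleton p x ih =>
    rw [List.foldl_append, List.foldl_cons, List.foldl_nil, ih]
    simp only [pvStepA, pvBucket_append]
    split_ifs <;> simp_all [pvRank]

-- A's value is the concatenation of the four buckets
lemma a_eq_buckets (fields : List String) :
    smart_order_fields_py fields =
      pvBucket 0 fields ++ pvBucket 1 fields ++ pvBucket 2 fields ++ pvBucket 3 fields := by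
  unfold smart_order_fields_py
  rw [a_fold_state]

-- insertBy skips a prefix it never goes before
lemma insertBy_skip {α : Type} (before : α → α → Bool) (x : α) (l m : List α)
    (h : ∀ y ∈ l, before x y = false) :
    PySem.List.insertBy before x (l ++ m) = l ++ PySem.List.insertBy before x m := by
  induction l with
  | nil => simp
  | cons a l ih =>
    cases m with
    | nil =>
      simp only [List.append_nil] at ih ⊢
      simp [PySem.List.insertBy, h a (by simp), ih (fun y hy => h y (by simp [hy]))]
    | cons b m =>
      simp [PySem.List.insertBy, h a (by simp), ih (fun y hy => h y (by simp [hy]))]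

-- insertBy puts x in front when it goes before everything
lemma insertBy_front {α : Type} (before : α → α → Bool) (x : α) (m : List α)
    (h : ∀ y ∈ m, before x y = true) :
    PySem.List.insertBy before x m = x :: m := by
  cases m with
  | nil => rfl
  | cons a l => simp [PySem.List.insertBy, h a (by simp)]

-- insert x after everything not greater and before everything greater (the stable position)
lemma insert_mid (x : String) (l m : List String)
    (hl : ∀ y ∈ l, ¬ pvRank x < pvRank y) (hm : ∀ y ∈ m, pvRank x < pvRank y) :
    PySem.List.insertBy (fun a b => decide (pvRank a < pvRank b)) x (l ++ m) = l ++ x :: m := by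
  rw [insertBy_skip _ _ _ _ (by simpa using hl), insertBy_front _ _ _ (by simpa using hm)]

-- B's stable sort also produces the concatenation of the four buckets
lemma b_eq_buckets (fields : List String) :
    smart_order_fields_py_alt fields =
      pvBucket 0 fields ++ pvBucket 1 fields ++ pvBucket 2 fields ++ pvBucket 3 fields := by
  unfold smart_order_fields_py_alt PySem.List.sorted
  simp only [Bool.false_eq_true, if_false]
  induction fields using List.reverseRecOn with
  | nil => rfl
  | append_singleton p x ih =>
    rw [List.foldl_append, List.foldl_cons, List.foldl_nil, ih]
    rcases pvRank_cases x with h | h | h | h <;>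
      simp only [pvBucket_append, h] <;> norm_num
    · -- rank 0 : insert right after bucket 0
      rw [insert_mid x (pvBucket 0 p) _
        (fun y hy => by have := mem_pvBucket_rank hy; omega)
        (fun y hy => by
          simp only [List.mem_append] at hy
          rcases hy with h' | h' | h' <;> (have := mem_pvBucket_rank h'; omega))]
    · -- rank 1 : insert after buckets 0 and 1
      rw [show pvBucket 0 p ++ (pvBucket 1 p ++ (pvBucket 2 p ++ pvBucket 3 p))
            = (pvBucket 0 p ++ pvBucket 1 p) ++ (pvBucket 2 p ++ pvBucket 3 p) by
          simp [List.append_assoc]]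
      rw [insert_mid x _ _
        (fun y hy => by
          simp only [List.mem_append] at hy
          rcases hy with h' | h' <;> (have := mem_pvBucket_rank h'; omega))
        (fun y hy => by
          simp only [List.mem_append] at hy
          rcases hy with h' | h' <;> (have := mem_pvBucket_rank h'; omega))]
      simp [List.append_assoc]
    · -- rank 2 : insert after buckets 0, 1 and 2
      rw [show pvBucket 0 p ++ (pvBucket 1 p ++ (pvBucket 2 p ++ pvBucket 3 p))
            = (pvBucket 0 p ++ (pvBucket 1 p ++ pvBucket 2 p)) ++ pvBucket 3 p by
          simp [List.append_assoc]]
      rw [insert_mid x _ _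
        (fun y hy => by
          simp only [List.mem_append] at hy
          rcases hy with h' | h' | h' <;> (have := mem_pvBucket_rank h'; omega))
        (fun y hy => by have := mem_pvBucket_rank hy; omega)]
      simp [List.append_assoc]
    · -- rank 3 : insert at the very end
      rw [show pvBucket 0 p ++ (pvBucket 1 p ++ (pvBucket 2 p ++ pvBucket 3 p))
            = (pvBucket 0 p ++ (pvBucket 1 p ++ (pvBucket 2 p ++ pvBucket 3 p))) ++ ([] : List String) by
          simp]
      rw [insert_mid x _ _
        (fun y hy => by
          simp only [List.mem_append] at hy
          rcases hy with h' | h' | h' | h' <;> (have := mem_pvBucket_rank h'; omega))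
        (fun y hy => by simp at hy)]
      simp [List.append_assoc]

-- ===== VERDICT (by name: the statement is the Claim_ definition above) =====
theorem smart_order_fields_py_spec : Claim_equal_smart_order_fields_py := by
  intro fields _
  unfold Spec_smart_order_fields_py
  rw [a_eq_buckets, b_eq_buckets]
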